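-- pv_equiv track=rewrite | github.com/NataliiaRom/Hillel_QAautoPython_learning | lesson7/homework_07.py | reverse_unique_tuple
-- ===== SOURCE A (Python) =====
-- def reverse_unique_tuple(list):
--
--     list_reverse = list[::-1]
--     list_reverse_without_dups = []
--
--     for i in range(len(list_reverse)):
--         if list_reverse[i] not in list_reverse_without_dups:
--             list_reverse_without_dups.append(list_reverse[i])
--
--     tuple_reverse_without_dups = tuple(list_reverse_without_dups)
--     return tuple_reverse_without_dups
-- ===== SOURCE B (Python) =====
-- def reverse_unique_tuple(list):
--     # Two linear passes: map each value to its last index, then walk indices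
--     # descending and emit a value exactly at its last occurrence.
--     last = {}
--     for i, x in enumerate(list):
--         last[x] = i
--     out = []
--     for i in range(len(list) - 1, -1, -1):
--         x = list[i]
--         if last[x] == i:
--             out.append(x)
--     return tuple(out)
-- ===== Notes on version B (the rewrite author's own statement) =====
-- stated objective: faster
-- what changed: Replaces reverse + quadratic membership scan of the output with two linear passes: a dict of last-occurrence indices built forward, then a descending index walk emitting each value at its last occurrence.
import Mathlib
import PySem

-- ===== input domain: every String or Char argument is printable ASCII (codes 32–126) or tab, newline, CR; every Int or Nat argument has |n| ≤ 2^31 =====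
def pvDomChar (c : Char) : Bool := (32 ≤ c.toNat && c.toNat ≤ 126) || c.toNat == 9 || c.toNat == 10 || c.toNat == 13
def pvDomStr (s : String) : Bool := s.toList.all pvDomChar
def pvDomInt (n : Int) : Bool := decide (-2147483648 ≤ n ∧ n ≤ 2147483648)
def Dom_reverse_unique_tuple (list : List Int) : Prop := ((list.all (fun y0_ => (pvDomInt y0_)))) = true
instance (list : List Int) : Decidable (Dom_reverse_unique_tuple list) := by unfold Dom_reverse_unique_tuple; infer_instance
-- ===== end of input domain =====

-- B replaces the reverse + quadratic output-membership scan with two linear passes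
-- (last-occurrence dict, then a descending index walk); return values proved equal.

-- ===== PORT A =====
def reverse_unique_tuple (list : List Int) : List Int :=
  -- list[::-1]; slice? with step -1 is never none
  let list_reverse := (PySem.List.slice? list none none (-1)).getD []
  -- for i in range(len(list_reverse)): if list_reverse[i] not in acc: acc.append(...)
  (PySem.List.pyRange 0 (list_reverse.length : Int) 1).foldl
    (fun acc i =>
      if PySem.List.pyGetD list_reverse i 0 ∉ acc then
        acc ++ [PySem.List.pyGetD list_reverse i 0]
      else acc) []

-- ===== PORT B =====
def reverse_unique_tuple_alt (list : List Int) : List Int :=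
  -- last = {}; for i, x in enumerate(list): last[x] = i
  let last := (PySem.List.enumerate list 0).foldl
    (fun d p => d.insert p.2 p.1) PySem.Dict.empty
  -- for i in range(len(list)-1, -1, -1): if last[list[i]] == i: out.append(list[i])
  -- last[x] never raises here (x = list[i] was inserted); getD's default -1 is never an index i ≥ 0
  (PySem.List.pyRange ((list.length : Int) - 1) (-1) (-1)).foldl
    (fun out i =>
      if last.getD (PySem.List.pyGetD list i 0) (-1) == i then
        out ++ [PySem.List.pyGetD list i 0]
      else out) []

-- ===== PRECONDITION & SPEC =====
def Spec_reverse_unique_tuple (list : List Int) (out : List Int) : Prop := out = reverse_unique_tuple_alt list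
instance (list : List Int) (out : List Int) : Decidable (Spec_reverse_unique_tuple list out) := by unfold Spec_reverse_unique_tuple; infer_instance

-- ===== CLAIM (what is proved, stated in full; the proofs are below) =====
def Claim_equal_reverse_unique_tuple : Prop := ∀ (list : List Int), Dom_reverse_unique_tuple list → Spec_reverse_unique_tuple list (reverse_unique_tuple list)

-- ===== LEMMAS AND PROOFS =====

-- dedup keeping the first occurrence (the common specification of both ports)
def dedupFirst : List Int → List Int
  | [] => []
  | x :: l => x :: dedupFirst (l.filter (fun y => y ≠ x))
termination_by l => l.length
decreasing_by
  simp only [List.length_cons, List.length_unattach]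
  exact Nat.lt_succ_of_le (le_trans (List.length_filter_le _ _) (by simp))

theorem dedupFirst_filter_aux : ∀ (n : Nat) (l : List Int), l.length ≤ n → ∀ q : Int → Bool,
    dedupFirst (l.filter q) = (dedupFirst l).filter q := by
  intro n
  induction n with
  | zero =>
    intro l hl q
    rw [List.eq_nil_of_length_eq_zero (Nat.le_zero.mp hl)]
    simp [dedupFirst]
  | succ n ih =>
    intro l hl q
    match l with
    | [] => simp [dedupFirst]
    | x :: l =>
      rw [List.filter_cons]
      by_cases h : q x
      · simp only [h, if_pos]
        rw [dedupFirst, dedupFirst]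
        rw [List.filter_cons]
        simp only [h, if_pos]
        congr 1
        have hlen : (l.filter (fun y => decide (y ≠ x))).length ≤ n := by
          have := List.length_filter_le (fun y => decide (y ≠ x)) l
          simp only [List.length_cons] at hl
          omega
        rw [List.filter_filter, ← ih _ hlen q, List.filter_filter]
        congr 1
        exact List.filter_congr (fun z _ => Bool.and_comm _ _)
      · simp only [h, if_neg, Bool.false_eq_true, not_false_iff]
        rw [dedupFirst, List.filter_cons]
        simp only [h, if_neg, Bool.false_eq_true, not_false_iff]
        have hlen : (l.filter (fun y => decide (y ≠ x))).length ≤ n := by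
          have := List.length_filter_le (fun y => decide (y ≠ x)) l
          simp only [List.length_cons] at hl
          omega
        rw [← ih _ hlen q, List.filter_filter]
        congr 1
        apply List.filter_congr
        intro z _
        by_cases hz : z = x
        · subst hz; simp [h]
        · simp [hz]

theorem dedupFirst_filter (l : List Int) (q : Int → Bool) :
    dedupFirst (l.filter q) = (dedupFirst l).filter q :=
  dedupFirst_filter_aux l.length l le_rfl q

theorem foldl_dedupFirst (ys : List Int) : ∀ acc : List Int,
    ys.foldl (fun acc y => if y ∉ acc then acc ++ [y] else acc) acc
      = acc ++ dedupFirst (ys.filter (fun y => y ∉ acc)) := by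
  induction ys with
  | nil => intro acc; simp [dedupFirst]
  | cons y ys ih =>
    intro acc
    rw [List.foldl_cons, List.filter_cons]
    by_cases h : y ∈ acc
    · rw [if_neg (by simp [h]), if_neg (by simp [h])]
      exact ih acc
    · simp only [h, not_false_eq_true, decide_true, if_pos]
      rw [ih (acc ++ [y]), dedupFirst]
      have hf : ys.filter (fun z => decide (z ∉ acc ++ [y]))
          = (ys.filter (fun z => z ∉ acc)).filter (fun z => z ≠ y) := by
        rw [List.filter_filter]
        congr 1
        funext z
        by_cases hz : z = y
        · subst hz; simp
        · simp [hz, List.mem_append]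
      rw [hf]
      simp

theorem portA_eq (l : List Int) : reverse_unique_tuple l = dedupFirst l.reverse := by
  unfold reverse_unique_tuple
  rw [PySem.List.slice?_none_none_neg_one]
  simp only [Option.getD_some]
  rw [PySem.List.foldl_pyRange_zero_pyGetD' l.reverse 0
    (fun acc x => if x ∉ acc then acc ++ [x] else acc) []]
  rw [foldl_dedupFirst]
  have hfe : l.reverse.filter (fun y => decide (y ∉ ([] : List Int))) = l.reverse :=
    List.filter_eq_self.mpr (fun a _ => by simp)
  rw [hfe, List.nil_append]

-- the last-occurrence dict of B, as built by its first loop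
def lastDict (l : List Int) : PySem.Dict Int Int :=
  (PySem.List.enumerate l 0).foldl (fun d p => d.insert p.2 p.1) PySem.Dict.empty

theorem lastDict_append (xs : List Int) (x : Int) :
    lastDict (xs ++ [x]) = (lastDict xs).insert x (xs.length : Int) := by
  unfold lastDict
  rw [PySem.List.enumerate_append, List.foldl_append]
  simp

theorem portB_step (xs : List Int) (x : Int) :
    reverse_unique_tuple_alt (xs ++ [x])
      = x :: (reverse_unique_tuple_alt xs).filter (fun y => y ≠ x) := by
  unfold reverse_unique_tuple_alt
  rw [show ((PySem.List.enumerate (xs ++ [x]) 0).foldl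
        (fun d p => d.insert p.2 p.1) PySem.Dict.empty)
      = (lastDict xs).insert x (xs.length : Int) from lastDict_append xs x]
  rw [show ((PySem.List.enumerate xs 0).foldl
        (fun d p => d.insert p.2 p.1) PySem.Dict.empty) = lastDict xs from rfl]
  have hn : (((xs ++ [x]).length : Int) - 1) = (xs.length : Int) := by simp
  rw [hn]
  rw [PySem.List.pyRange_neg_one_cons (by omega)]
  rw [List.foldl_cons]
  have hx : PySem.List.pyGetD (xs ++ [x]) (xs.length : Int) 0 = x := by
    rw [PySem.List.pyGetD_eq_getElem _ 0 (by omega) (by simp)]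
    simp
  rw [hx, PySem.Dict.getD_insert_self, if_pos (by simp), List.nil_append]
  rw [PySem.List.foldl_append_if
    (fun i => (((lastDict xs).insert x (xs.length : Int)).getD (PySem.List.pyGetD (xs ++ [x]) i 0) (-1) == i))
    (fun i => PySem.List.pyGetD (xs ++ [x]) i 0)]
  rw [PySem.List.foldl_append_if
    (fun i => ((lastDict xs).getD (PySem.List.pyGetD xs i 0) (-1) == i))
    (fun i => PySem.List.pyGetD xs i 0)]
  simp only [List.nil_append, List.singleton_append]
  congr 1
  -- both sides are filter/map over the descending range of indices of xs
  have hmem : ∀ i ∈ PySem.List.pyRange ((xs.length : Int) - 1) (-1) (-1),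
      PySem.List.pyGetD (xs ++ [x]) i 0 = PySem.List.pyGetD xs i 0 := by
    intro i hi
    rw [PySem.List.mem_pyRange_neg_one] at hi
    rw [PySem.List.pyGetD_eq_getElem _ 0 (by omega) (by simp; omega),
        PySem.List.pyGetD_eq_getElem _ 0 (by omega) (by omega)]
    exact List.getElem_append_left (by omega)
  have hcond : ∀ i ∈ PySem.List.pyRange ((xs.length : Int) - 1) (-1) (-1),
      (((lastDict xs).insert x (xs.length : Int)).getD (PySem.List.pyGetD (xs ++ [x]) i 0) (-1) == i)
        = (((lastDict xs).getD (PySem.List.pyGetD xs i 0) (-1) == i)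
            && decide (PySem.List.pyGetD xs i 0 ≠ x)) := by
    intro i hi
    have hfi := hmem i hi
    rw [PySem.List.mem_pyRange_neg_one] at hi
    rw [hfi, PySem.Dict.getD_insert]
    by_cases hvx : PySem.List.pyGetD xs i 0 = x
    · rw [if_pos hvx]
      simp only [hvx, ne_eq, not_true_eq_false, decide_false, Bool.and_false]
      simp only [beq_eq_false_iff_ne, ne_eq]
      omega
    · rw [if_neg hvx]
      simp [hvx]
  rw [List.filter_congr hcond,
      List.map_congr_left (fun i hi => hmem i (List.mem_of_mem_filter hi)),
      List.filter_map, List.filter_filter]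
  congr 1
  exact List.filter_congr (fun i _ => by simp [Function.comp, Bool.and_comm])

theorem portB_eq (l : List Int) : reverse_unique_tuple_alt l = dedupFirst l.reverse := by
  induction l using List.reverseRecOn with
  | nil => rw [List.reverse_nil, dedupFirst]; decide
  | append_singleton xs x ih =>
    rw [portB_step, List.reverse_append, List.reverse_singleton, List.singleton_append,
        dedupFirst, dedupFirst_filter, ih]

-- ===== VERDICT (by name: the statement is the Claim_ definition above) =====
theorem reverse_unique_tuple_spec : Claim_equal_reverse_unique_tuple := by
  intro l _
  unfold Spec_reverse_unique_tuple
  rw [portA_eq, portB_eq]
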